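-- pv_equiv track=rewrite | github.com/querypie/querypie-docs | confluence-mdx/bin/reverse_sync/visible_segments.py | _join_rendered_pieces
-- ===== SOURCE A (Python) =====
-- from typing import Any, Iterable, List, Literal, Tuple
--
-- def _join_rendered_pieces(pieces: Iterable[str]) -> str:
--     result = ""
--     for piece in pieces:
--         if not piece:
--             continue
--         if not result:
--             result = piece
--             continue
--         joiner = ""
--         if not result.endswith((' ', '\t')) and not piece.startswith((' ', '\t')):
--             joiner = " "
--         result = result + joiner + piece
--     return result
-- ===== SOURCE B (Python) =====
-- def _join_rendered_pieces(pieces):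
--     kept = [p for p in pieces if p]
--     if not kept:
--         return ""
--     frags = [kept[0]]
--     for prev, cur in zip(kept, kept[1:]):
--         if not prev.endswith((' ', '\t')) and not cur.startswith((' ', '\t')):
--             frags.append(" ")
--         frags.append(cur)
--     return "".join(frags)
-- ===== Notes on version B (the rewrite author's own statement) =====
-- stated objective: faster
-- what changed: A grows one string by repeated concatenation, re-testing the accumulated result's trailing whitespace at each step; B makes two passes - filter out empty pieces, then decide each single-space separator from the previous piece alone over consecutive pairs - and assembles the result with one ''.join.
import Mathlib
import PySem

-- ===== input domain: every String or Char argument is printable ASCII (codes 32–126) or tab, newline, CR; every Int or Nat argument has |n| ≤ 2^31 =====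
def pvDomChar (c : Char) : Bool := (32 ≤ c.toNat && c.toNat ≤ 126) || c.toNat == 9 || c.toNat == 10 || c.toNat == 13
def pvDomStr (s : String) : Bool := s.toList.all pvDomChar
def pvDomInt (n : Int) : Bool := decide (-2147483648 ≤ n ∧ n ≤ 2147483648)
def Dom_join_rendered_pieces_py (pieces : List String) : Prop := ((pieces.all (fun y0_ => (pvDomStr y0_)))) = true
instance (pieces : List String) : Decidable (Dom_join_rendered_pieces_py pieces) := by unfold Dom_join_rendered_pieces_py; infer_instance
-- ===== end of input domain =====

-- B re-decomposes A's O(n^2) accumulating concatenation into two passes (filter the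
-- non-empty pieces, then decide each separator from the previous PIECE) assembled by
-- one join; same return value on every input.

-- shared helper: Python's s.endswith((' ', '\t')) / s.startswith((' ', '\t'))
def pvEndsWS (cs : List Char) : Bool :=
  PySem.Chars.endswith cs [' '] || PySem.Chars.endswith cs ['\t']
def pvStartsWS (cs : List Char) : Bool :=
  PySem.Chars.startswith cs [' '] || PySem.Chars.startswith cs ['\t']

-- ===== PORT A =====
def join_rendered_pieces_py (pieces : List String) : String :=
  String.ofList (pieces.foldl (fun result piece =>
    let p := piece.toList
    if p.isEmpty then result
    else if result.isEmpty then p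
    else
      let joiner : List Char := if !pvEndsWS result && !pvStartsWS p then [' '] else []
      result ++ joiner ++ p) [])

-- ===== PORT B =====
def join_rendered_pieces_py_alt (pieces : List String) : String :=
  let kept := (pieces.map String.toList).filter (fun p => !p.isEmpty)
  match kept with
  | [] => ""
  | first :: rest =>
    let frags := ((first :: rest).zip rest).foldl
      (fun frags pc =>
        let frags := if !pvEndsWS pc.1 && !pvStartsWS pc.2 then frags ++ [[' ']] else frags
        frags ++ [pc.2]) [first]
    String.ofList (PySem.Chars.join [] frags)

-- ===== PRECONDITION & SPEC =====
def Spec_join_rendered_pieces_py (pieces : List String) (out : String) : Prop := out = join_rendered_pieces_py_alt pieces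
instance (pieces : List String) (out : String) : Decidable (Spec_join_rendered_pieces_py pieces out) := by unfold Spec_join_rendered_pieces_py; infer_instance

-- ===== CLAIM (what is proved, stated in full; the proofs are below) =====
def Claim_equal_join_rendered_pieces_py : Prop := ∀ (pieces : List String), Dom_join_rendered_pieces_py pieces → Spec_join_rendered_pieces_py pieces (join_rendered_pieces_py pieces)

-- ===== LEMMAS AND PROOFS =====

-- the separator A inserts between the accumulated result and the next piece
def pvSep (prev p : List Char) : List Char :=
  if !pvEndsWS prev && !pvStartsWS p then [' '] else []

-- separator + piece for each consecutive pair, decided from the previous piece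
def pairFlat : List Char → List (List Char) → List Char
  | _, [] => []
  | prev, p :: ps => pvSep prev p ++ p ++ pairFlat p ps

-- the fragment list B builds, described recursively
def fragsList : List Char → List (List Char) → List (List Char)
  | _, [] => []
  | prev, p :: ps => (if !pvEndsWS prev && !pvStartsWS p then [[' ']] else []) ++ [p] ++ fragsList p ps

theorem suffix_single_iff (c : Char) (xs : List Char) : [c] <:+ xs ↔ xs.getLast? = some c := by
  constructor
  · rintro ⟨t, rfl⟩; simp
  · intro h
    have hne : xs ≠ [] := by rintro rfl; simp at h
    refine ⟨xs.dropLast, ?_⟩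
    have h2 := List.dropLast_append_getLast hne
    have h3 : xs.getLast hne = c := by
      rw [List.getLast?_eq_some_getLast hne, Option.some_inj] at h; exact h
    rw [h3] at h2; exact h2

theorem pvEndsWS_append (a p : List Char) (hp : p ≠ []) : pvEndsWS (a ++ p) = pvEndsWS p := by
  have h : (a ++ p).getLast? = p.getLast? := by
    rw [List.getLast?_append]
    cases hgl : p.getLast? with
    | none => exact absurd (List.getLast?_eq_none_iff.mp hgl) hp
    | some c => rfl
  simp only [pvEndsWS]
  rw [Bool.eq_iff_iff]
  simp only [Bool.or_eq_true, PySem.Chars.endswith_iff, suffix_single_iff, h]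

theorem join_nil_flatten (l : List (List Char)) : PySem.Chars.join [] l = l.flatten := by
  induction l with
  | nil => simp [PySem.Chars.join_nil]
  | cons p ps ih =>
    cases ps with
    | nil => simp [PySem.Chars.join_singleton]
    | cons q rs => rw [PySem.Chars.join_cons_cons] at *; simp_all

-- A's loop, named so we can induct on it
def stepA (result : List Char) (piece : String) : List Char :=
  let p := piece.toList
  if p.isEmpty then result
  else if result.isEmpty then p
  else
    let joiner : List Char := if !pvEndsWS result && !pvStartsWS p then [' '] else []
    result ++ joiner ++ p

def filterNE (pieces : List String) : List (List Char) :=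
  (pieces.map String.toList).filter (fun p => !p.isEmpty)

-- A's loop over the remaining pieces, with a non-empty accumulator, appends sep+piece
-- for each non-empty piece, where the separator is decided from the piece last appended
theorem foldA_eq (pieces : List String) :
    ∀ (acc prev : List Char), acc ≠ [] → pvEndsWS acc = pvEndsWS prev →
    pieces.foldl stepA acc = acc ++ pairFlat prev (filterNE pieces) := by
  induction pieces with
  | nil => intro acc prev _ _; simp [filterNE, pairFlat]
  | cons piece ps ih =>
    intro acc prev hacc hends
    by_cases hp : piece.toList.isEmpty
    · have : stepA acc piece = acc := by simp [stepA, hp]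
      rw [List.foldl_cons, this, ih acc prev hacc hends]
      simp [filterNE, hp]
    · have hpne : piece.toList ≠ [] := by simpa using hp
      have hae : acc.isEmpty = false := by simpa using hacc
      have hstep : stepA acc piece = acc ++ pvSep prev piece.toList ++ piece.toList := by
        simp [stepA, hp, hae, pvSep, hends]
      rw [List.foldl_cons, hstep,
        ih (acc ++ pvSep prev piece.toList ++ piece.toList) piece.toList
          (by simp [hpne]) (pvEndsWS_append _ _ hpne)]
      have : filterNE (piece :: ps) = piece.toList :: filterNE ps := by
        simp [filterNE, hp]
      rw [this, pairFlat]
      simp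

theorem foldA_nil_eq (pieces : List String) :
    pieces.foldl stepA [] =
      (match filterNE pieces with
       | [] => []
       | f :: rest => f ++ pairFlat f rest) := by
  induction pieces with
  | nil => simp [filterNE]
  | cons piece ps ih =>
    by_cases hp : piece.toList.isEmpty
    · have : stepA [] piece = [] := by simp [stepA, hp]
      rw [List.foldl_cons, this, ih]
      simp [filterNE, hp]
    · have hpne : piece.toList ≠ [] := by simpa using hp
      have h1 : stepA [] piece = piece.toList := by simp [stepA, hp]
      have h2 : filterNE (piece :: ps) = piece.toList :: filterNE ps := by
        simp [filterNE, hp]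
      rw [List.foldl_cons, h1, h2, foldA_eq ps piece.toList piece.toList hpne rfl]

-- B's pair fold builds exactly fragsList, appended to the seed
theorem foldB_eq (rest : List (List Char)) :
    ∀ (f : List Char) (acc : List (List Char)),
    ((f :: rest).zip rest).foldl
      (fun frags pc =>
        let frags := if !pvEndsWS pc.1 && !pvStartsWS pc.2 then frags ++ [[' ']] else frags
        frags ++ [pc.2]) acc = acc ++ fragsList f rest := by
  induction rest with
  | nil => intro f acc; simp [fragsList]
  | cons c rs ih =>
    intro f acc
    have hz : ((f :: c :: rs).zip (c :: rs)) = (f, c) :: ((c :: rs).zip rs) := rfl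
    rw [hz, List.foldl_cons, ih]
    simp only [fragsList]
    split <;> simp

theorem flatten_fragsList (rest : List (List Char)) :
    ∀ prev, (fragsList prev rest).flatten = pairFlat prev rest := by
  induction rest with
  | nil => intro prev; simp [fragsList, pairFlat]
  | cons p ps ih =>
    intro prev
    simp only [fragsList, pairFlat, pvSep]
    split <;> simp [ih]

-- ===== VERDICT (by name: the statement is the Claim_ definition above) =====
theorem join_rendered_pieces_py_spec : Claim_equal_join_rendered_pieces_py := by
  intro pieces _
  unfold Spec_join_rendered_pieces_py join_rendered_pieces_py join_rendered_pieces_py_alt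
  rw [show (fun (result : List Char) (piece : String) =>
      let p := piece.toList
      if p.isEmpty then result
      else if result.isEmpty then p
      else
        let joiner : List Char := if !pvEndsWS result && !pvStartsWS p then [' '] else []
        result ++ joiner ++ p) = stepA from rfl]
  rw [foldA_nil_eq]
  show String.ofList _ = _
  cases h : filterNE pieces with
  | nil => simp only [filterNE] at h; rw [h]
  | cons f rest =>
    simp only [filterNE] at h
    rw [h]
    simp only
    rw [foldB_eq, join_nil_flatten]
    simp [flatten_fragsList]
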